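-- pv_equiv track=rewrite | github.com/ArielMoise23/Unlocking-Information-Security-Course | lesson2_basic_cryptography/shuffeDecipher.py | analyze_letter_frequency
-- ===== SOURCE A (Python) =====
-- def analyze_letter_frequency(text):
--     """
--     Analyzes the given text and returns the most and least common letters.
--
--     Args:
--         text (str): The text to analyze
--
--     Returns:
--         tuple: (most_common_letters, least_common_letters, frequency_dict)
--             - most_common_letters: list of most frequent letters
--             - least_common_letters: list of least frequent letters
--             - frequency_dict: dictionary with all letter frequencies
--     """
--     # Convert text to lowercase and filter out non-alphabetic characters
--     text = ''.join(char for char in text.lower() if char.isalpha())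
--
--     if not text:
--         return ([], [], {})
--
--     # Count letter frequencies
--     frequency = {}
--     for char in text:
--         if char in frequency:
--             frequency[char] += 1
--         else:
--             frequency[char] = 1
--
--     # Find the highest and lowest frequencies
--     if not frequency:
--         return ([], [], {})
--
--     max_freq = max(frequency.values())
--     min_freq = min(frequency.values())
--
--     # Get letters with highest and lowest frequencies
--     most_common = [char for char, count in frequency.items() if count == max_freq]
--     least_common = [char for char, count in frequency.items() if count == min_freq]
--
--     return (most_common, least_common, frequency)
-- ===== SOURCE B (Python) =====
-- def analyze_letter_frequency(text):
--     frequency = {}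
--     for char in text.lower():
--         if char.isalpha():
--             frequency[char] = frequency.get(char, 0) + 1
--     items = list(frequency.items())
--     if not items:
--         return ([], [], {})
--     (c0, n0) = items[0]
--     hi, most = n0, [c0]
--     lo, least = n0, [c0]
--     for c, n in items[1:]:
--         if n > hi:
--             hi, most = n, [c]
--         elif n == hi:
--             most.append(c)
--         if n < lo:
--             lo, least = n, [c]
--         elif n == lo:
--             least.append(c)
--     return (most, least, frequency)
-- ===== Notes on version B (the rewrite author's own statement) =====
-- stated objective: alternative
-- what changed: B replaces A's max()/min() over the values plus two separate filter comprehensions over the items by a single pass over the frequency items that maintains the running maximum and minimum together with the lists of letters tied with them; B also counts via dict.get in one combined filter+count loop instead of building a filtered string first.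
import Mathlib
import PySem

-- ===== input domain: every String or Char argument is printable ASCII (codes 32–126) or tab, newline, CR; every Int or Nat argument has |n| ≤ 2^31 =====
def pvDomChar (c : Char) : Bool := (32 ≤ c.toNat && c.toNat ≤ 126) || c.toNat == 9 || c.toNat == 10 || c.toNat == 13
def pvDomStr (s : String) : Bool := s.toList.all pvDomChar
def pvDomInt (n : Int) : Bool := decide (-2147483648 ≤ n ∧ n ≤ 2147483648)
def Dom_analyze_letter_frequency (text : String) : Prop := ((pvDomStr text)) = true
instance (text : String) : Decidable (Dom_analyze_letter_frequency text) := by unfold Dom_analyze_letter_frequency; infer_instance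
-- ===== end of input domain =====

-- B replaces A's max()/min() plus two filter passes over the frequency dict by ONE scan of the
-- items that maintains the running extremes together with their tied letters (alternative decomposition).

-- ===== PORT A =====
-- counting loop: if char in frequency: frequency[char] += 1 else: frequency[char] = 1
def alfCountA : PySem.Dict Char Int → List Char → PySem.Dict Char Int
  | d, [] => d
  | d, c :: cs => alfCountA (if d.contains c then d.insert c (d.getD c 0 + 1) else d.insert c 1) cs

def analyze_letter_frequency (text : String) : List String × List String × (List (String × Int)) :=
  let filtered := (PySem.Chars.lower text.toList).filter PySem.Chars.isalpha
  if filtered = [] then ([], [], [])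
  else
    let freq := alfCountA PySem.Dict.empty filtered
    if freq.items = [] then ([], [], [])
    else
      -- `.getD 0` only totalises max?/min?: frequency.values() is nonempty on this branch
      let maxF := (PySem.List.max? freq.values (fun v => v)).getD 0
      let minF := (PySem.List.min? freq.values (fun v => v)).getD 0
      let most := (freq.items.filter (fun p => p.2 == maxF)).map (fun p => String.ofList [p.1])
      let least := (freq.items.filter (fun p => p.2 == minF)).map (fun p => String.ofList [p.1])
      (most, least, freq.items.map (fun p => (String.ofList [p.1], p.2)))

-- ===== PORT B =====
-- counting loop: for char in text.lower(): if char.isalpha(): frequency[char] = frequency.get(char, 0) + 1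
def alfCountB : PySem.Dict Char Int → List Char → PySem.Dict Char Int
  | d, [] => d
  | d, c :: cs => alfCountB (if PySem.Chars.isalpha c then d.insert c (d.getD c 0 + 1) else d) cs

-- single pass over items[1:] maintaining (hi, most) and (lo, least)
def alfScan : (Int × List Char) → (Int × List Char) → List (Char × Int) → (Int × List Char) × (Int × List Char)
  | hm, lm, [] => (hm, lm)
  | (hi, most), (lo, least), (c, n) :: rest =>
      alfScan
        (if hi < n then (n, [c]) else if n == hi then (hi, most ++ [c]) else (hi, most))
        (if n < lo then (n, [c]) else if n == lo then (lo, least ++ [c]) else (lo, least))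
        rest

def analyze_letter_frequency_alt (text : String) : List String × List String × (List (String × Int)) :=
  let freq := alfCountB PySem.Dict.empty (PySem.Chars.lower text.toList)
  match freq.items with
  | [] => ([], [], [])
  | (c0, n0) :: rest =>
      let r := alfScan (n0, [c0]) (n0, [c0]) rest
      (r.1.2.map (fun c => String.ofList [c]), r.2.2.map (fun c => String.ofList [c]),
       freq.items.map (fun p => (String.ofList [p.1], p.2)))

-- ===== PRECONDITION & SPEC =====
def Spec_analyze_letter_frequency (text : String) (out : List String × List String × (List (String × Int))) : Prop := out = analyze_letter_frequency_alt text
instance (text : String) (out : List String × List String × (List (String × Int))) : Decidable (Spec_analyze_letter_frequency text out) := by unfold Spec_analyze_letter_frequency; infer_instance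

-- ===== CLAIM (what is proved, stated in full; the proofs are below) =====
def Claim_equal_analyze_letter_frequency : Prop := ∀ (text : String), Dom_analyze_letter_frequency text → Spec_analyze_letter_frequency text (analyze_letter_frequency text)

-- ===== LEMMAS AND PROOFS =====

-- A's counting loop is the insert/getD fold (both branches insert getD+1: getD is 0 when the key is absent)
lemma alfCountA_eq_foldl (cs : List Char) (d : PySem.Dict Char Int) :
    alfCountA d cs = cs.foldl (fun d c => d.insert c (d.getD c 0 + 1)) d := by
  induction cs generalizing d with
  | nil => rfl
  | cons c cs ih =>
    simp only [alfCountA, List.foldl_cons]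
    by_cases h : d.contains c = true
    · rw [if_pos h, ih]
    · rw [if_neg h, ih]
      congr 2
      have : d.get? c = none := by
        simp only [PySem.Dict.contains, List.any_eq_true, not_exists, not_and,
          Bool.not_eq_true] at h
        simp only [PySem.Dict.get?, Option.map_eq_none_iff, List.find?_eq_none]
        intro p hp
        simpa using h p hp
      simp [PySem.Dict.getD, this]

-- B's counting loop over the whole lowered text equals A's loop over the filtered text
lemma alfCountB_eq_alfCountA (cs : List Char) (d : PySem.Dict Char Int) :
    alfCountB d cs = alfCountA d (cs.filter PySem.Chars.isalpha) := by
  induction cs generalizing d with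
  | nil => rfl
  | cons c cs ih =>
    simp only [alfCountB, List.filter_cons]
    by_cases h : PySem.Chars.isalpha c = true
    · simp only [h, ite_true, alfCountA, ih]
      congr 1
      by_cases hc : d.contains c = true
      · rw [if_pos hc]
      · rw [if_neg hc]
        congr 2
        have : d.get? c = none := by
          simp only [PySem.Dict.contains, List.any_eq_true, not_exists, not_and,
            Bool.not_eq_true] at hc
          simp only [PySem.Dict.get?, Option.map_eq_none_iff, List.find?_eq_none]
          intro p hp
          simpa using hc p hp
        simp [PySem.Dict.getD, this]
    · simp only [h, Bool.false_eq_true, ite_false, ih]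

lemma max?_cons : ∀ (xs : List Int) (x : Int), PySem.List.max? (x :: xs) (fun v => v) = some (xs.foldl max x)
  | [], x => rfl
  | y :: xs, x => by
      have h1 : PySem.List.max? (x :: y :: xs) (fun v => v)
              = PySem.List.max? (max x y :: xs) (fun v => v) := by
        show List.foldl _ (if (x:Int) < y then some y else some x) xs
           = List.foldl _ (some (max x y)) xs
        by_cases h : x < y
        · rw [if_pos h, max_eq_right h.le]
        · rw [if_neg h, max_eq_left (not_lt.mp h)]
      rw [h1, max?_cons xs (max x y), List.foldl_cons]

lemma min?_cons : ∀ (xs : List Int) (x : Int), PySem.List.min? (x :: xs) (fun v => v) = some (xs.foldl min x)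
  | [], x => rfl
  | y :: xs, x => by
      have h1 : PySem.List.min? (x :: y :: xs) (fun v => v)
              = PySem.List.min? (min x y :: xs) (fun v => v) := by
        show List.foldl _ (if (y:Int) < x then some y else some x) xs
           = List.foldl _ (some (min x y)) xs
        by_cases h : y < x
        · rw [if_pos h, min_eq_right h.le]
        · rw [if_neg h, min_eq_left (not_lt.mp h)]
      rw [h1, min?_cons xs (min x y), List.foldl_cons]

def scanMax : Int × List Char → List (Char × Int) → Int × List Char
  | hm, [] => hm
  | (hi, most), (c, n) :: rest =>
      scanMax (if hi < n then (n, [c]) else if n == hi then (hi, most ++ [c]) else (hi, most)) rest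

def scanMin : Int × List Char → List (Char × Int) → Int × List Char
  | lm, [] => lm
  | (lo, least), (c, n) :: rest =>
      scanMin (if n < lo then (n, [c]) else if n == lo then (lo, least ++ [c]) else (lo, least)) rest

lemma alf_le_foldl_max (t : List (Char × Int)) : ∀ a : Int, a ≤ t.foldl (fun x p => max x p.2) a := by
  induction t with
  | nil => intro a; simp
  | cons q t ih => intro a; exact le_trans (le_max_left _ _) (ih (max a q.2))

lemma alf_foldl_min_le (t : List (Char × Int)) : ∀ a : Int, t.foldl (fun x p => min x p.2) a ≤ a := by
  induction t with
  | nil => intro a; simp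
  | cons q t ih => intro a; exact le_trans (ih (min a q.2)) (min_le_left _ _)

lemma alfScan_eq : ∀ (rest : List (Char × Int)) (hm lm : Int × List Char),
    alfScan hm lm rest = (scanMax hm rest, scanMin lm rest) := by
  intro rest
  induction rest with
  | nil => intro hm lm; rfl
  | cons p t ih =>
    intro hm lm
    obtain ⟨c, n⟩ := p; obtain ⟨hi, most⟩ := hm; obtain ⟨lo, least⟩ := lm
    simp only [alfScan, scanMax, scanMin]
    exact ih _ _

lemma scanMax_spec : ∀ (rest : List (Char × Int)) (hi : Int) (most : List Char),
    scanMax (hi, most) rest =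
      (rest.foldl (fun a p => max a p.2) hi,
       (if hi = rest.foldl (fun a p => max a p.2) hi then most else []) ++
         (rest.filter (fun p => p.2 == rest.foldl (fun a p => max a p.2) hi)).map (·.1)) := by
  intro rest
  induction rest with
  | nil => intro hi most; simp [scanMax]
  | cons p t ih =>
    intro hi most
    obtain ⟨c, n⟩ := p
    simp only [scanMax, List.foldl_cons, List.filter_cons]
    by_cases h1 : hi < n
    · have hM : max hi n = n := max_eq_right h1.le
      have hle : n ≤ t.foldl (fun a p => max a p.2) n := alf_le_foldl_max t n
      rw [if_pos h1, ih]
      simp only [hM]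
      generalize hg : List.foldl (fun a p => max a p.2) n t = M at hle ⊢
      have hne : ¬ hi = M := by omega
      by_cases h : n = M
      · subst h; simp [hne]
      · simp [h, hne]
    · rw [if_neg h1]
      have hM : max hi n = hi := max_eq_left (not_lt.mp h1)
      have hle : hi ≤ t.foldl (fun a p => max a p.2) hi := alf_le_foldl_max t hi
      simp only [hM]
      by_cases h2 : n = hi
      · subst h2
        simp only [beq_self_eq_true, ite_true]
        rw [ih]
        generalize hg : List.foldl (fun a p => max a p.2) n t = M at hle ⊢
        by_cases h : n = M
        · subst h; simp
        · simp [h]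
      · have hb : (n == hi) = false := by simpa using h2
        simp only [hb, Bool.false_eq_true, ite_false]
        rw [ih]
        generalize hg : List.foldl (fun a p => max a p.2) hi t = M at hle ⊢
        have hne : ¬ n = M := by omega
        have hbn : (n == M) = false := by simpa using hne
        simp [hbn]

lemma scanMin_spec : ∀ (rest : List (Char × Int)) (lo : Int) (least : List Char),
    scanMin (lo, least) rest =
      (rest.foldl (fun a p => min a p.2) lo,
       (if lo = rest.foldl (fun a p => min a p.2) lo then least else []) ++
         (rest.filter (fun p => p.2 == rest.foldl (fun a p => min a p.2) lo)).map (·.1)) := by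
  intro rest
  induction rest with
  | nil => intro lo least; simp [scanMin]
  | cons p t ih =>
    intro lo least
    obtain ⟨c, n⟩ := p
    simp only [scanMin, List.foldl_cons, List.filter_cons]
    by_cases h1 : n < lo
    · have hM : min lo n = n := min_eq_right h1.le
      have hle : t.foldl (fun a p => min a p.2) n ≤ n := alf_foldl_min_le t n
      rw [if_pos h1, ih]
      simp only [hM]
      generalize hg : List.foldl (fun a p => min a p.2) n t = M at hle ⊢
      have hne : ¬ lo = M := by omega
      by_cases h : n = M
      · subst h; simp [hne]
      · simp [h, hne]
    · rw [if_neg h1]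
      have hM : min lo n = lo := min_eq_left (not_lt.mp h1)
      have hle : t.foldl (fun a p => min a p.2) lo ≤ lo := alf_foldl_min_le t lo
      simp only [hM]
      by_cases h2 : n = lo
      · subst h2
        simp only [beq_self_eq_true, ite_true]
        rw [ih]
        generalize hg : List.foldl (fun a p => min a p.2) n t = M at hle ⊢
        by_cases h : n = M
        · subst h; simp
        · simp [h]
      · have hb : (n == lo) = false := by simpa using h2
        simp only [hb, Bool.false_eq_true, ite_false]
        rw [ih]
        generalize hg : List.foldl (fun a p => min a p.2) lo t = M at hle ⊢
        have hne : ¬ n = M := by omega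
        have hbn : (n == M) = false := by simpa using hne
        simp [hbn]

-- ===== VERDICT (by name: the statement is the Claim_ definition above) =====
theorem analyze_letter_frequency_spec : Claim_equal_analyze_letter_frequency := by
  intro text _
  unfold Spec_analyze_letter_frequency analyze_letter_frequency analyze_letter_frequency_alt
  have hc : alfCountB PySem.Dict.empty (PySem.Chars.lower text.toList)
      = PySem.Dict.counter ((PySem.Chars.lower text.toList).filter PySem.Chars.isalpha) := by
    rw [alfCountB_eq_alfCountA, alfCountA_eq_foldl]
    exact PySem.Dict.foldl_insert_getD_add_one_eq_counter _
  have hca : alfCountA PySem.Dict.empty ((PySem.Chars.lower text.toList).filter PySem.Chars.isalpha)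
      = PySem.Dict.counter ((PySem.Chars.lower text.toList).filter PySem.Chars.isalpha) := by
    rw [alfCountA_eq_foldl]
    exact PySem.Dict.foldl_insert_getD_add_one_eq_counter _
  by_cases hF : (PySem.Chars.lower text.toList).filter PySem.Chars.isalpha = []
  · simp only [hc, hF]
    simp [PySem.Dict.counter, PySem.Dict.empty]
  · rw [if_neg hF]
    obtain ⟨c, cs, hFc⟩ : ∃ c cs, (PySem.Chars.lower text.toList).filter PySem.Chars.isalpha = c :: cs := by
      cases h : (PySem.Chars.lower text.toList).filter PySem.Chars.isalpha with
      | nil => exact absurd h hF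
      | cons a l => exact ⟨a, l, rfl⟩
    have hitems := PySem.Dict.items_counter ((PySem.Chars.lower text.toList).filter PySem.Chars.isalpha)
    obtain ⟨k0, ktl, hks⟩ : ∃ k0 ktl,
        PySem.Set.ofList ((PySem.Chars.lower text.toList).filter PySem.Chars.isalpha) = k0 :: ktl := by
      cases h : PySem.Set.ofList ((PySem.Chars.lower text.toList).filter PySem.Chars.isalpha) with
      | nil =>
        exfalso
        have hm : c ∈ PySem.Set.ofList ((PySem.Chars.lower text.toList).filter PySem.Chars.isalpha) := by
          rw [PySem.Set.mem_ofList, hFc]; exact List.mem_cons_self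
        rw [h] at hm; exact absurd hm (List.not_mem_nil)
      | cons a l => exact ⟨a, l, rfl⟩
    rw [hks] at hitems
    set F := (PySem.Chars.lower text.toList).filter PySem.Chars.isalpha with hFdef
    set n0 : Int := (F.count k0 : Int) with hn0
    set rest := ktl.map (fun k => (k, (F.count k : Int))) with hrest
    have hitems' : (PySem.Dict.counter F).items = (k0, n0) :: rest := by
      rw [hitems]; rfl
    have hvals : (PySem.Dict.counter F).values = n0 :: rest.map (·.2) := by
      simp only [PySem.Dict.values, hitems', List.map_cons]
    simp only [hca, hc, hitems']
    rw [if_neg (by simp)]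
    simp only [hvals, max?_cons, min?_cons, Option.getD_some]
    have hfm : ∀ (g : Int → Int → Int), (rest.map (·.2)).foldl g n0 = rest.foldl (fun a p => g a p.2) n0 := by
      intro g; exact List.foldl_map
    rw [hfm max, hfm min]
    simp only [alfScan_eq, scanMax_spec, scanMin_spec]
    simp only [List.filter_cons]
    generalize rest.foldl (fun a p => max a p.2) n0 = Mx
    generalize rest.foldl (fun a p => min a p.2) n0 = Mn
    by_cases hmx : n0 = Mx <;> by_cases hmn : n0 = Mn <;>
      simp [hmx, hmn, Function.comp_def] <;> split_ifs <;> simp
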